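-- pv_equiv track=rewrite | github.com/AndrejZaf/python-static-site-generator | src/utils.py | check_valid_heading
-- ===== SOURCE A (Python) =====
-- def check_valid_heading(block):
--     count = 0
--     for character in block:
--         if character == "#" and count <= 6:
--             count += 1
--             continue
--         elif character == " " and count <= 6:
--             break
--         else:
--             return False
--     return True if len(block) > count + 1 else False
-- ===== SOURCE B (Python) =====
-- def check_valid_heading(block):
--     count = len(block) - len(block.lstrip('#'))
--     if count > 6:
--         return False
--     rest = block[count:]
--     return rest.startswith(' ') and len(rest) > 1
-- ===== Notes on version B (the rewrite author's own statement) =====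
-- stated objective: simpler
-- what changed: Replaces the stateful character loop with early return/break/continue by three string operations: count leading hashes via lstrip, slice off the prefix, and check the remainder starts with a space and has something after it.
import Mathlib
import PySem

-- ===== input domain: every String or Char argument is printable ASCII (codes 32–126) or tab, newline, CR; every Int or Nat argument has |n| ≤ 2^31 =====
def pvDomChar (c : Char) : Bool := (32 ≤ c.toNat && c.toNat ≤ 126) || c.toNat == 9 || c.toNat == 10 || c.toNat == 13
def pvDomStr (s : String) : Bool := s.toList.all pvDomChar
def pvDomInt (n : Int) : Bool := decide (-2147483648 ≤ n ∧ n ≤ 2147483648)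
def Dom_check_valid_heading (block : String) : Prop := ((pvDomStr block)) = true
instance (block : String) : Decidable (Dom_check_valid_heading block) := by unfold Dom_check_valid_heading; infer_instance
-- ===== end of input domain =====

-- B replaces A's stateful loop (with break/continue/early return) by lstrip/slice/startswith string operations; objective: simpler.

-- ===== PORT A =====
-- the for-loop: none = the loop executed 'return False'; some c = loop ended (break or exhausted) with count c
def chkLoopA : List Char → Nat → Option Nat
  | [], c => some c
  | ch :: rest, c =>
    if ch = '#' ∧ c ≤ 6 then chkLoopA rest (c + 1)
    else if ch = ' ' ∧ c ≤ 6 then some c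
    else none

def check_valid_heading (block : String) : Bool :=
  match chkLoopA block.toList 0 with
  | none => false
  | some c => decide (block.toList.length > c + 1)

-- ===== PORT B =====
-- block.lstrip('#') is exactly dropping the leading '#' characters (exact: lstrip with a one-char set)
def check_valid_heading_alt (block : String) : Bool :=
  let l := block.toList
  let count := l.length - (l.dropWhile (· = '#')).length
  if count > 6 then false
  else
    let rest := l.drop count            -- block[count:] with 0 ≤ count ≤ len
    PySem.Chars.startswith rest [' '] && decide (rest.length > 1)

-- ===== PRECONDITION & SPEC =====
def Spec_check_valid_heading (block : String) (out : Bool) : Prop := out = check_valid_heading_alt block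
instance (block : String) (out : Bool) : Decidable (Spec_check_valid_heading block out) := by unfold Spec_check_valid_heading; infer_instance

-- ===== CLAIM (what is proved, stated in full; the proofs are below) =====
def Claim_equal_check_valid_heading : Prop := ∀ (block : String), Dom_check_valid_heading block → Spec_check_valid_heading block (check_valid_heading block)

-- ===== LEMMAS AND PROOFS =====

-- closed characterisation of A's loop by the leading-'#' prefix (takeWhile/dropWhile)
theorem chkLoopA_eq (l : List Char) (c : Nat) (hc : c ≤ 7) :
    chkLoopA l c =
      if (l.takeWhile (· = '#')).length + c ≤ 7 then
        match l.dropWhile (· = '#') with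
        | [] => some ((l.takeWhile (· = '#')).length + c)
        | ch :: _ =>
          if ch = ' ' ∧ (l.takeWhile (· = '#')).length + c ≤ 6 then
            some ((l.takeWhile (· = '#')).length + c)
          else none
      else none := by
  induction l generalizing c with
  | nil => simp [chkLoopA, hc]
  | cons ch t ih =>
    by_cases hch : ch = '#'
    · subst hch
      by_cases hc6 : c ≤ 6
      · rw [chkLoopA, if_pos ⟨rfl, hc6⟩, ih (c + 1) (by omega),
          List.takeWhile_cons_of_pos (by simp), List.dropWhile_cons_of_pos (by simp)]
        simp only [List.length_cons]
        rw [show (List.takeWhile (fun x => decide (x = '#')) t).length + 1 + c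
              = (List.takeWhile (fun x => decide (x = '#')) t).length + (c + 1) from by omega]
      · have hc7 : c = 7 := by omega
        subst hc7
        rw [chkLoopA, if_neg (by rintro ⟨-, h⟩; omega), if_neg (by rintro ⟨h, -⟩; exact absurd h (by decide)),
          List.takeWhile_cons_of_pos (by simp)]
        simp only [List.length_cons]
        rw [if_neg (by omega)]
    · rw [chkLoopA, if_neg (show ¬(ch = '#' ∧ c ≤ 6) from fun h => hch h.1)]
      simp only [List.takeWhile_cons, List.dropWhile_cons, hch, decide_false,
        Bool.false_eq_true, if_false, List.length_nil, Nat.zero_add]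
      rw [if_pos hc]

theorem length_takeWhile_add_dropWhile (p : Char → Bool) (l : List Char) :
    (l.takeWhile p).length + (l.dropWhile p).length = l.length := by
  induction l with
  | nil => rfl
  | cons a t ih =>
    by_cases h : p a
    · simp [h]; omega
    · simp [h]

theorem drop_length_takeWhile (p : Char → Bool) (l : List Char) :
    l.drop (l.takeWhile p).length = l.dropWhile p := by
  induction l with
  | nil => rfl
  | cons a t ih =>
    by_cases h : p a
    · simp [h, ih]
    · simp [h]

-- ===== VERDICT (by name: the statement is the Claim_ definition above) =====
theorem check_valid_heading_spec : Claim_equal_check_valid_heading := by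
  intro block _
  unfold Spec_check_valid_heading
  simp only [check_valid_heading, check_valid_heading_alt]
  have hlen := length_takeWhile_add_dropWhile (fun x => decide (x = '#')) block.toList
  have hdrop := drop_length_takeWhile (fun x => decide (x = '#')) block.toList
  have hcount : block.toList.length
        - (List.dropWhile (fun x => decide (x = '#')) block.toList).length
      = (List.takeWhile (fun x => decide (x = '#')) block.toList).length := by omega
  rw [chkLoopA_eq block.toList 0 (by omega), hcount, hdrop]
  simp only [Nat.add_zero]
  generalize List.dropWhile (fun x => decide (x = '#')) block.toList = dw at hlen ⊢
  generalize (List.takeWhile (fun x => decide (x = '#')) block.toList).length = L at hlen ⊢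
  generalize block.toList.length = N at hlen ⊢
  by_cases h7 : L ≤ 7
  · rw [if_pos h7]
    cases dw with
    | nil =>
      simp only [List.length_nil] at hlen
      have h1 : PySem.Chars.startswith ([] : List Char) [' '] = false := by decide
      by_cases h6 : L > 6
      · rw [if_pos h6]; simp; omega
      · rw [if_neg h6]; simp [h1]; omega
    | cons ch t' =>
      simp only [List.length_cons] at hlen
      by_cases h6 : L > 6
      · rw [if_pos h6]
        have hif : ¬ (ch = ' ' ∧ L ≤ 6) := fun h => by omega
        simp [hif]
      · rw [if_neg h6]
        have h6' : L ≤ 6 := by omega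
        by_cases hsp : ch = ' '
        · subst hsp
          have hsw : PySem.Chars.startswith (' ' :: t') [' '] = true :=
            (PySem.Chars.startswith_iff (' ' :: t') [' ']).mpr (by simp [List.cons_prefix_cons])
          simp [hsw, h6']
          omega
        · have hsw : PySem.Chars.startswith (ch :: t') [' '] = false := by
            rw [Bool.eq_false_iff]
            intro hc
            have h := (PySem.Chars.startswith_iff (ch :: t') [' ']).mp hc
            rw [List.cons_prefix_cons] at h
            exact hsp h.1.symm
          simp [hsw, hsp]
  · rw [if_neg h7, if_pos (show L > 6 by omega)]
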